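-- pv_equiv track=rewrite | github.com/ExeQuantCode/HeatFlow | utl/geom-grid3d.py | is_closed_surface
-- ===== SOURCE A (Python) =====
-- def get_edge(vertex1, vertex2):
--     #Return a tuple representing an edge, ensuring a consistent ordering.
--     return tuple(sorted([vertex1, vertex2]))
--
-- def is_closed_surface(structure):
--     # each edge can only be met by 2 faces
--     edge_count = {}
--     # Count edges for all faces
--     for face in structure['FACES']:
--         vertices = list(face.values())[0]
--         edge = get_edge(vertices[0], vertices[1])
--         edge_count[edge] = edge_count.get(edge, 0) + 1
--         edge = get_edge(vertices[0], vertices[2])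
--         edge_count[edge] = edge_count.get(edge, 0) + 1
--         edge = get_edge(vertices[1], vertices[2])
--         edge_count[edge] = edge_count.get(edge, 0) + 1
--     # Check if every edge is used exactly twice
--     for count in edge_count.values():
--         if count != 2:
--             return False
--     return True
-- ===== SOURCE B (Python) =====
-- def is_closed_surface(structure):
--     # Sort-then-scan: flatten all faces into one list of sorted-vertex edges,
--     # sort it, and check that equal edges come in runs of exactly two.
--     edges = []
--     for face in structure['FACES']:
--         vertices = list(face.values())[0]
--         a, b, c = vertices[0], vertices[1], vertices[2]
--         edges.append(sorted([a, b]))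
--         edges.append(sorted([a, c]))
--         edges.append(sorted([b, c]))
--     edges.sort()
--     i = 0
--     n = len(edges)
--     while i < n:
--         if i + 1 >= n or edges[i + 1] != edges[i]:
--             return False
--         if i + 2 < n and edges[i + 2] == edges[i]:
--             return False
--         i += 2
--     return True
-- ===== Notes on version B (the rewrite author's own statement) =====
-- stated objective: alternative
-- what changed: Replaces the hash-map edge counter with flattening all face edges into one list, sorting it, and scanning consecutive runs, returning False as soon as a run of equal edges has length other than 2.
-- outside the precondition, e.g. on is_closed_surface({}): A raises KeyError, B raises KeyError; on is_closed_surface({'FACES': [{}]}): A raises IndexError, B raises IndexError; on is_closed_surface({'FACES': [{'v': [1, 2]}]}): A raises IndexError, B raises IndexError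
import Mathlib
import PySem

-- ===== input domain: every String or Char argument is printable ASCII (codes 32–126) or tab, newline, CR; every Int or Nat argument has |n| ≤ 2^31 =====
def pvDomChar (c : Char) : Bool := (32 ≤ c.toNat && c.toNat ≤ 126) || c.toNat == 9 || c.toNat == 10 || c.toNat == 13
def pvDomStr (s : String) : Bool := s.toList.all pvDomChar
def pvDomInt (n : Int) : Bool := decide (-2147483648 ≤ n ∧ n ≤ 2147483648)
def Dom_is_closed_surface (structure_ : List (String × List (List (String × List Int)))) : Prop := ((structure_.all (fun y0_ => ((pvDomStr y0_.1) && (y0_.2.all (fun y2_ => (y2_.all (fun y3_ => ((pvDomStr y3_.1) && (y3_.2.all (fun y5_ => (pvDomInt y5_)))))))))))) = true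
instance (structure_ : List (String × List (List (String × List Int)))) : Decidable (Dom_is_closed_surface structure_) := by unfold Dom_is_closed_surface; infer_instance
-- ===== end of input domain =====

-- B replaces A's hash-map edge counting by sort-then-scan over the flattened edge list (alternative
-- algorithm, similar cost); equivalence of the RETURN value is proved on Pre_ (the non-raising inputs).

-- ===== PORT A =====
-- tuple(sorted([vertex1, vertex2])) : the 2-tuple is represented by its underlying 2-element sorted list
def get_edge (vertex1 vertex2 : Int) : List Int :=
  PySem.List.sorted [vertex1, vertex2] (fun x => x) false

def is_closed_surface (structure_ : List (String × List (List (String × List Int)))) : Bool :=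
  match (PySem.Dict.ofList structure_).get? "FACES" with
  | none => false  -- KeyError: excluded by Pre_
  | some faces =>
    let edge_count := faces.foldl (fun d face =>
      let vertices := (PySem.List.pyGet? (PySem.Dict.ofList face).values 0).getD []
      let edge1 := get_edge ((PySem.List.pyGet? vertices 0).getD 0) ((PySem.List.pyGet? vertices 1).getD 0)
      let d := d.insert edge1 (d.getD edge1 0 + 1)
      let edge2 := get_edge ((PySem.List.pyGet? vertices 0).getD 0) ((PySem.List.pyGet? vertices 2).getD 0)
      let d := d.insert edge2 (d.getD edge2 0 + 1)
      let edge3 := get_edge ((PySem.List.pyGet? vertices 1).getD 0) ((PySem.List.pyGet? vertices 2).getD 0)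
      d.insert edge3 (d.getD edge3 0 + 1)) (PySem.Dict.empty : PySem.Dict (List Int) Int)
    edge_count.values.all (fun count => count == 2)

-- ===== PORT B =====
-- edges.sort() on lists of Int is lexicographic: the Mathlib lex LinearOrder on List Int, pinned explicitly
def pvSortEdges (xs : List (List Int)) : List (List Int) :=
  @PySem.List.sorted (List Int) (List Int) LinearOrder.toPartialOrder.toLT LinearOrder.toDecidableLT xs (fun x => x) false

-- the while-loop run scan of Source B (i advances by 2 over the sorted list), as structural recursion
def pvCheckRuns : List (List Int) → Bool
  | [] => true
  | [_] => false
  | a :: b :: t =>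
      decide (a = b) && (match t with | [] => true | c :: _ => decide (c ≠ a)) && pvCheckRuns t

def is_closed_surface_alt (structure_ : List (String × List (List (String × List Int)))) : Bool :=
  match (PySem.Dict.ofList structure_).get? "FACES" with
  | none => false  -- KeyError: excluded by Pre_
  | some faces =>
    let edges := faces.foldl (fun es face =>
      let vertices := (PySem.List.pyGet? (PySem.Dict.ofList face).values 0).getD []
      let a := (PySem.List.pyGet? vertices 0).getD 0
      let b := (PySem.List.pyGet? vertices 1).getD 0
      let c := (PySem.List.pyGet? vertices 2).getD 0
      es ++ [PySem.List.sorted [a, b] (fun x => x) false,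
             PySem.List.sorted [a, c] (fun x => x) false,
             PySem.List.sorted [b, c] (fun x => x) false]) []
    pvCheckRuns (pvSortEdges edges)

-- ===== PRECONDITION & SPEC =====
-- Pre_ excludes exactly the raising inputs: a missing 'FACES' key (KeyError), a face that is an empty
-- dict (IndexError on list(face.values())[0]) or whose first value list has fewer than 3 vertices
-- (IndexError on vertices[2]).
def Pre_is_closed_surface (structure_ : List (String × List (List (String × List Int)))) : Prop :=
  ((PySem.Dict.ofList structure_).get? "FACES").isSome = true ∧
  ∀ face ∈ ((PySem.Dict.ofList structure_).get? "FACES").getD [],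
    3 ≤ ((PySem.List.pyGet? (PySem.Dict.ofList face).values 0).getD []).length
instance (structure_ : List (String × List (List (String × List Int)))) : Decidable (Pre_is_closed_surface structure_) := by unfold Pre_is_closed_surface; infer_instance

def pvWitness_is_closed_surface : (List (String × List (List (String × List Int)))) :=
  [("FACES", [[("vertices", [0, 1, 2])], [("vertices", [0, 1, 2])]])]

def Spec_is_closed_surface (structure_ : List (String × List (List (String × List Int)))) (out : Bool) : Prop := out = is_closed_surface_alt structure_
instance (structure_ : List (String × List (List (String × List Int)))) (out : Bool) : Decidable (Spec_is_closed_surface structure_ out) := by unfold Spec_is_closed_surface; infer_instance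

-- ===== CLAIM (what is proved, stated in full; the proofs are below) =====
def Claim_equal_is_closed_surface : Prop := ∀ (structure_ : List (String × List (List (String × List Int)))), Dom_is_closed_surface structure_ → Pre_is_closed_surface structure_ → Spec_is_closed_surface structure_ (is_closed_surface structure_)

-- ===== LEMMAS AND PROOFS =====

-- proof-only helpers: the flattened edge list of a face list
def pvVerts (face : List (String × List Int)) : List Int :=
  (PySem.List.pyGet? (PySem.Dict.ofList face).values 0).getD []

def pvFaceEdges (face : List (String × List Int)) : List (List Int) :=
  let a := (PySem.List.pyGet? (pvVerts face) 0).getD 0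
  let b := (PySem.List.pyGet? (pvVerts face) 1).getD 0
  let c := (PySem.List.pyGet? (pvVerts face) 2).getD 0
  [get_edge a b, get_edge a c, get_edge b c]

def pvEdges (faces : List (List (String × List Int))) : List (List Int) :=
  faces.flatMap pvFaceEdges

-- A's counting loop over faces = one insert-count fold over the flattened edge list
theorem pvA_fold (faces : List (List (String × List Int))) (d : PySem.Dict (List Int) Int) :
    faces.foldl (fun d face =>
      let vertices := (PySem.List.pyGet? (PySem.Dict.ofList face).values 0).getD []
      let edge1 := get_edge ((PySem.List.pyGet? vertices 0).getD 0) ((PySem.List.pyGet? vertices 1).getD 0)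
      let d := d.insert edge1 (d.getD edge1 0 + 1)
      let edge2 := get_edge ((PySem.List.pyGet? vertices 0).getD 0) ((PySem.List.pyGet? vertices 2).getD 0)
      let d := d.insert edge2 (d.getD edge2 0 + 1)
      let edge3 := get_edge ((PySem.List.pyGet? vertices 1).getD 0) ((PySem.List.pyGet? vertices 2).getD 0)
      d.insert edge3 (d.getD edge3 0 + 1)) (d : PySem.Dict (List Int) Int)
    = (pvEdges faces).foldl (fun d e => d.insert e (d.getD e 0 + 1)) d := by
  induction faces generalizing d with
  | nil => rfl
  | cons f fs ih =>
      rw [pvEdges, List.flatMap_cons, List.foldl_append, List.foldl_cons]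
      exact ih _

-- B's edge-collecting loop = the same flattened edge list
theorem pvB_fold (faces : List (List (String × List Int))) :
    faces.foldl (fun es face =>
      let vertices := (PySem.List.pyGet? (PySem.Dict.ofList face).values 0).getD []
      let a := (PySem.List.pyGet? vertices 0).getD 0
      let b := (PySem.List.pyGet? vertices 1).getD 0
      let c := (PySem.List.pyGet? vertices 2).getD 0
      es ++ [PySem.List.sorted [a, b] (fun x => x) false,
             PySem.List.sorted [a, c] (fun x => x) false,
             PySem.List.sorted [b, c] (fun x => x) false]) []
    = pvEdges faces := by
  have h := PySem.List.foldl_append_eq_flatMap pvFaceEdges faces []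
  simpa using h

-- A's final check = every edge occurs exactly twice in the edge list
theorem pvCounterAll (es : List (List Int)) :
    ((PySem.Dict.counter es).values.all (fun c => c == 2) = true)
      ↔ ∀ e ∈ es, es.count e = 2 := by
  have hv : (PySem.Dict.counter es).values
      = (PySem.Set.ofList es).map (fun k => ((es.count k : Int))) := by
    show (PySem.Dict.counter es).items.map (fun p => p.2) = _
    rw [PySem.Dict.items_counter]
    simp [List.map_map, Function.comp]
  rw [hv]
  simp only [List.all_eq_true, List.mem_map]
  constructor
  · intro h e he
    have := h ((es.count e : Int)) ⟨e, (PySem.Set.mem_ofList _ _).mpr he, rfl⟩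
    have : (es.count e : Int) = 2 := by simpa using this
    exact_mod_cast this
  · rintro h c ⟨e, he, rfl⟩
    have := h e ((PySem.Set.mem_ofList _ _).mp he)
    simp [this]

-- counting in a list with two explicit heads
theorem pvCount2 (x a b : List Int) (l : List (List Int)) :
    (a :: b :: l).count x = l.count x + ((if b = x then 1 else 0) + (if a = x then 1 else 0)) := by
  simp [List.count_cons]
  omega

-- the run scan on a sorted (Pairwise ≤) list = every element occurs exactly twice
theorem pvChk : ∀ (l : List (List Int)), l.Pairwise (fun a b => a ≤ b) →
    (pvCheckRuns l = true ↔ ∀ e ∈ l, l.count e = 2) := by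
  intro l
  induction l using pvCheckRuns.induct with
  | case1 =>
      intro _; simp [pvCheckRuns]
  | case2 a =>
      intro _
      simp only [pvCheckRuns]
      constructor
      · intro h; exact absurd h (by simp)
      · intro h
        have := h a (by simp)
        simp at this
  | case3 a b t ih =>
      intro hp
      obtain ⟨ha, hp2⟩ := List.pairwise_cons.mp hp
      obtain ⟨hb, hpt⟩ := List.pairwise_cons.mp hp2
      have hab : a ≤ b := ha b (by simp)
      cases t with
      | nil =>
          have hred : pvCheckRuns [a, b] = decide (a = b) := by
            simp [pvCheckRuns]
          rw [hred]
          simp only [decide_eq_true_eq]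
          constructor
          · rintro rfl
            intro e he
            have he2 : e = a := by simpa using he
            subst he2
            simp
          · intro h
            have h2 := h a (by simp)
            by_contra hne
            have hba2 : ¬ (b = a) := fun hh => hne hh.symm
            rw [pvCount2] at h2
            simp [hba2] at h2
      | cons c t2 =>
          have hred : pvCheckRuns (a :: b :: c :: t2)
              = (decide (a = b) && decide (c ≠ a) && pvCheckRuns (c :: t2)) := rfl
          rw [hred]
          simp only [Bool.and_eq_true, decide_eq_true_eq]
          have hac : a ≤ c := ha c (by simp)
          constructor
          · rintro ⟨⟨hba, hca⟩, hrec⟩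
            subst hba
            have hanott : a ∉ c :: t2 := by
              intro hmem
              rcases List.mem_cons.mp hmem with h1 | h2
              · exact hca h1.symm
              · have h3 : c ≤ a := (List.pairwise_cons.mp hpt).1 a h2
                exact hca (le_antisymm h3 hac)
            have hcnt0 : (c :: t2).count a = 0 := List.count_eq_zero.mpr hanott
            intro e he
            rcases List.mem_cons.mp he with rfl | he2
            · rw [pvCount2, hcnt0]; simp
            · rcases List.mem_cons.mp he2 with rfl | he3
              · rw [pvCount2, hcnt0]; simp
              · have hea : e ≠ a := fun hh => hanott (hh ▸ he3)
                have h5 := (ih hpt).mp hrec e he3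
                rw [pvCount2, h5]
                simp [Ne.symm hea]
          · intro h
            have h2 := h a (by simp)
            have hba : b = a := by
              by_contra hne
              have hne2 : ¬ (a = b) := fun hh => hne hh.symm
              have hlt : a < b := lt_of_le_of_ne hab hne2
              have hanott : a ∉ c :: t2 := fun hmem => absurd (hb a hmem) (not_le.mpr hlt)
              have h0 : (c :: t2).count a = 0 := List.count_eq_zero.mpr hanott
              rw [pvCount2, h0] at h2
              simp [hne] at h2
            have hba2 : a = b := hba.symm
            subst hba2
            have hcnt0 : (c :: t2).count a = 0 := by
              rw [pvCount2] at h2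
              simp at h2
              omega
            have hanott : a ∉ c :: t2 := List.count_eq_zero.mp hcnt0
            refine ⟨⟨rfl, fun hh => hanott (hh ▸ List.mem_cons_self ..)⟩, ?_⟩
            refine (ih hpt).mpr ?_
            intro e he
            have hea : e ≠ a := fun hh => hanott (hh ▸ he)
            have h6 := h e (by simp [he])
            rw [pvCount2] at h6
            simp [Ne.symm hea] at h6
            exact h6

-- B's sort-then-scan = every edge occurs exactly twice in the unsorted edge list
theorem pvBCount (es : List (List Int)) :
    (pvCheckRuns (pvSortEdges es) = true) ↔ ∀ e ∈ es, es.count e = 2 := by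
  have hperm : (pvSortEdges es).Perm es :=
    @PySem.List.sorted_perm (List Int) (List Int) LinearOrder.toPartialOrder.toLT
      LinearOrder.toDecidableLT es (fun x => x) false
  have hpw : (pvSortEdges es).Pairwise (fun a b => a ≤ b) :=
    PySem.List.sorted_pairwise es (fun x => x)
  rw [pvChk _ hpw]
  constructor
  · intro h e he
    have := h e (hperm.mem_iff.mpr he)
    rwa [hperm.count_eq] at this
  · intro h e he
    rw [hperm.count_eq]
    exact h e (hperm.mem_iff.mp he)

-- ===== VERDICT =====
theorem is_closed_surface_spec : Claim_equal_is_closed_surface := by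
  intro s _ _
  show is_closed_surface s = is_closed_surface_alt s
  unfold is_closed_surface is_closed_surface_alt
  cases h : (PySem.Dict.ofList s).get? "FACES" with
  | none => rfl
  | some faces =>
      simp only []
      refine Eq.trans (b := ((PySem.Dict.counter (pvEdges faces)).values.all (fun c => c == 2))) ?_ ?_
      · exact congrArg (fun d => d.values.all (fun count => count == 2))
          ((pvA_fold faces (PySem.Dict.empty : PySem.Dict (List Int) Int)).trans (PySem.Dict.foldl_insert_getD_add_one_eq_counter _))
      · exact (Bool.eq_iff_iff.mpr (by rw [pvCounterAll, pvBCount])).trans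
          (congrArg (fun es => pvCheckRuns (pvSortEdges es)) (pvB_fold faces).symm)
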